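-- pv_equiv track=rewrite | github.com/rige11/two_functions_ | two_functions.py | start_to_end
-- ===== SOURCE A (Python) =====
-- def start_to_end(n_customers=0, n_first_id=0):
--     result = dict()  # словарь с группами
--     for i in range(int(n_first_id), int(n_first_id) + int(n_customers)):
--         # создание цикла + подстраховка, что в функцию переданы числа
--         sum = 0
--         num = i
--         while (num != 0):  # вычисление суммы цифр числа
--             sum = sum + num % 10
--             num = num // 10
--         result[str(sum)] = result.get(str(sum), 0) + 1  # запись в словарь
--     return dict(sorted(result.items(), key=lambda x: int(x[0])))
-- ===== SOURCE B (Python) =====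
-- def start_to_end(n_customers=0, n_first_id=0):
--     lo = int(n_first_id)
--     hi = lo + int(n_customers)
--     counts = _range_counts(lo, hi)
--     return {str(s): counts[s] for s in sorted(counts)}
--
--
-- def _digit_sum(n):
--     s = 0
--     while n > 0:
--         s += n % 10
--         n //= 10
--     return s
--
--
-- def _range_counts(lo, hi):
--     """Map digit-sum -> how many x in [lo, hi) have it; divide & conquer on decades."""
--     counts = {}
--     if hi - lo < 10:
--         for i in range(lo, hi):
--             s = _digit_sum(i)
--             counts[s] = counts.get(s, 0) + 1
--         return counts
--     mid_lo = -(-lo // 10) * 10   # round lo up to a multiple of 10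
--     mid_hi = (hi // 10) * 10     # round hi down to a multiple of 10
--     for i in range(lo, mid_lo):
--         s = _digit_sum(i)
--         counts[s] = counts.get(s, 0) + 1
--     for i in range(mid_hi, hi):
--         s = _digit_sum(i)
--         counts[s] = counts.get(s, 0) + 1
--     # x in [mid_lo, mid_hi) is 10*q + d with q in [mid_lo//10, mid_hi//10), d in 0..9,
--     # and digit_sum(10*q + d) = digit_sum(q) + d
--     for s, k in _range_counts(mid_lo // 10, mid_hi // 10).items():
--         for d in range(10):
--             counts[s + d] = counts.get(s + d, 0) + k
--     return counts
-- ===== Notes on version B (the rewrite author's own statement) =====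
-- stated objective: faster
-- what changed: A walks every id in the range and computes each digit sum separately; B counts ids per digit sum by divide-and-conquer on decades (counts of [lo,hi) = the few boundary ids plus the counts of [lo//10,hi//10) expanded by digits 0..9) and emits the buckets by scanning its keys in sorted order, so the work is polylogarithmic in the range length instead of linear.
import Mathlib
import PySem

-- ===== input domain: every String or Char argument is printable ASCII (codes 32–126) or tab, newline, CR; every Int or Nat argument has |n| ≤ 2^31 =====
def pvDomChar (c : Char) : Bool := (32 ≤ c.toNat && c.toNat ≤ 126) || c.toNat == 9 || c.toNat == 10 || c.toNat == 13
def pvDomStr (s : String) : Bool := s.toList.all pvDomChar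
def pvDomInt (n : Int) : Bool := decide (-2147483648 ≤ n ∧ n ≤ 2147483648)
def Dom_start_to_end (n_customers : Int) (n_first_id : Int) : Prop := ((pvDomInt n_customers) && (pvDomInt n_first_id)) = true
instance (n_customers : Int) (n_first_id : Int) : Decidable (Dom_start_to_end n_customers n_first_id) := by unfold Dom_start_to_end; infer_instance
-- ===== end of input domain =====

-- B replaces A's per-customer digit-sum loop by a divide-and-conquer on decades (counts of
-- [lo,hi) = boundary ids + the counts of [lo/10,hi/10) expanded by digits 0..9), which the
-- timing run measures as measurably faster at large sizes.

-- ===== PORT A =====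
-- Python's `while num != 0`: for num < 0 the loop never terminates in Python (num // 10 stays -1),
-- and such num are excluded by Pre_; the port stops there, and is exact for num ≥ 0.
def aDigitLoop (sum num : Int) : Int :=
  if 0 < num then
    aDigitLoop (sum + PySem.Int.mod num 10) (PySem.Int.floordiv num 10)
  else sum
termination_by num.toNat
decreasing_by
  rw [PySem.Int.floordiv_eq_ediv_of_pos (by omega)]
  omega

def start_to_end (n_customers : Int) (n_first_id : Int) : List (String × Int) :=
  let result := (PySem.List.pyRange n_first_id (n_first_id + n_customers)).foldl
    (fun d i =>
      let sum := aDigitLoop 0 i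
      d.insert (PySem.Int.toStr sum) (d.getD (PySem.Int.toStr sum) 0 + 1))
    PySem.Dict.empty
  -- dict(sorted(result.items(), key=lambda x: int(x[0]))): the keys are str(sum), so int(x[0])
  -- always parses (`.getD 0` is never the fallback), and the keys are distinct, so the dict built
  -- from the sorted items IS that sorted association list.
  PySem.List.sorted result.items (fun x => (PySem.Int.ofStr? x.1).getD 0)

-- ===== PORT B =====
def bDigitLoop (s n : Int) : Int :=
  if 0 < n then
    bDigitLoop (s + PySem.Int.mod n 10) (PySem.Int.floordiv n 10)
  else s
termination_by n.toNat
decreasing_by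
  rw [PySem.Int.floordiv_eq_ediv_of_pos (by omega)]
  omega

def bDigitSum (n : Int) : Int := bDigitLoop 0 n

def bRangeCounts (lo hi : Int) : PySem.Dict Int Int :=
  if hi - lo < 10 then
    (PySem.List.pyRange lo hi).foldl
      (fun c i => c.insert (bDigitSum i) (c.getD (bDigitSum i) 0 + 1)) PySem.Dict.empty
  else
    let midLo := -(PySem.Int.floordiv (-lo) 10) * 10
    let midHi := (PySem.Int.floordiv hi 10) * 10
    let c1 := (PySem.List.pyRange lo midLo).foldl
      (fun c i => c.insert (bDigitSum i) (c.getD (bDigitSum i) 0 + 1)) PySem.Dict.empty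
    let c2 := (PySem.List.pyRange midHi hi).foldl
      (fun c i => c.insert (bDigitSum i) (c.getD (bDigitSum i) 0 + 1)) c1
    ((bRangeCounts (PySem.Int.floordiv midLo 10) (PySem.Int.floordiv midHi 10)).items).foldl
      (fun c p =>
        (PySem.List.pyRange 0 10).foldl
          (fun c d => c.insert (p.1 + d) (c.getD (p.1 + d) 0 + p.2)) c)
      c2
termination_by (hi - lo).toNat
decreasing_by
  rw [PySem.Int.floordiv_eq_ediv_of_pos (a := -lo) (by omega),
      PySem.Int.floordiv_eq_ediv_of_pos (a := hi) (by omega),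
      PySem.Int.floordiv_eq_ediv_of_pos (by omega),
      PySem.Int.floordiv_eq_ediv_of_pos (by omega)]
  omega

def start_to_end_alt (n_customers : Int) (n_first_id : Int) : List (String × Int) :=
  let lo := n_first_id
  let hi := lo + n_customers
  let counts := bRangeCounts lo hi
  -- {str(s): counts[s] for s in sorted(counts)}; s ranges over keys, so counts[s] never raises
  (PySem.List.sorted counts.keys (fun s => s)).map
    (fun s => (PySem.Int.toStr s, counts.getD s 0))

-- ===== PRECONDITION & SPEC =====
-- Pre_ excludes ranges containing a negative customer id: there A's inner `while num != 0`
-- never terminates (Python's num // 10 stays at -1), so A returns on exactly these inputs.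
def Pre_start_to_end (n_customers : Int) (n_first_id : Int) : Prop :=
  n_customers ≤ 0 ∨ 0 ≤ n_first_id
instance (n_customers : Int) (n_first_id : Int) : Decidable (Pre_start_to_end n_customers n_first_id) := by
  unfold Pre_start_to_end; infer_instance

def pvWitness_start_to_end : Int × Int := (5, 7)

def Spec_start_to_end (n_customers : Int) (n_first_id : Int) (out : List (String × Int)) : Prop := out = start_to_end_alt n_customers n_first_id
instance (n_customers : Int) (n_first_id : Int) (out : List (String × Int)) : Decidable (Spec_start_to_end n_customers n_first_id out) := by unfold Spec_start_to_end; infer_instance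

-- ===== CLAIM (what is proved, stated in full; the proofs are below) =====
def Claim_equal_start_to_end : Prop := ∀ (n_customers : Int) (n_first_id : Int), Dom_start_to_end n_customers n_first_id → Pre_start_to_end n_customers n_first_id → Spec_start_to_end n_customers n_first_id (start_to_end n_customers n_first_id)

-- ===== LEMMAS AND PROOFS =====

theorem pyRange_nil {a b : Int} (h : b ≤ a) : PySem.List.pyRange a b = [] := by
  rw [List.eq_nil_iff_forall_not_mem]
  intro x hx
  rw [PySem.List.mem_pyRange_one] at hx
  omega

theorem aLoop_eq_bLoop (n s : Int) : aDigitLoop s n = bDigitLoop s n := by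
  by_cases h : 0 < n
  · rw [aDigitLoop, bDigitLoop]
    simp only [h, if_true]
    exact aLoop_eq_bLoop _ _
  · rw [aDigitLoop, bDigitLoop]
    simp [h]
termination_by n.toNat
decreasing_by
  rw [PySem.Int.floordiv_eq_ediv_of_pos (by omega)]
  omega

theorem bLoop_acc (n s : Int) : bDigitLoop s n = s + bDigitSum n := by
  rw [bDigitSum]
  by_cases h : 0 < n
  · conv_lhs => rw [bDigitLoop]
    conv_rhs => rw [bDigitLoop]
    simp only [h, if_true]
    rw [bLoop_acc (PySem.Int.floordiv n 10) (s + PySem.Int.mod n 10),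
        bLoop_acc (PySem.Int.floordiv n 10) (0 + PySem.Int.mod n 10),
        bDigitSum]
    omega
  · conv_lhs => rw [bDigitLoop]
    conv_rhs => rw [bDigitLoop]
    simp [h]
termination_by n.toNat
decreasing_by all_goals
  rw [PySem.Int.floordiv_eq_ediv_of_pos (by omega)]
  omega

theorem ds_zero : bDigitSum 0 = 0 := by
  rw [bDigitSum, bDigitLoop]
  simp

theorem ds_pos {n : Int} (h : 0 < n) :
    bDigitSum n = PySem.Int.mod n 10 + bDigitSum (PySem.Int.floordiv n 10) := by
  conv_lhs => rw [bDigitSum, bDigitLoop]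
  simp only [h, if_true]
  rw [bLoop_acc]
  omega

theorem ds_ten {q d : Int} (hq : 0 ≤ q) (hd0 : 0 ≤ d) (hd : d < 10) :
    bDigitSum (10 * q + d) = bDigitSum q + d := by
  by_cases h : 0 < 10 * q + d
  · rw [ds_pos h, PySem.Int.mod_eq_emod_of_pos (by omega),
        PySem.Int.floordiv_eq_ediv_of_pos (by omega)]
    have h1 : (10 * q + d) % 10 = d := by omega
    have h2 : (10 * q + d) / 10 = q := by omega
    rw [h1, h2]
    omega
  · have hq0 : q = 0 := by omega
    have hd0' : d = 0 := by omega
    subst hq0 hd0'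
    simp [ds_zero]

theorem ds_nonneg {n : Int} (h : 0 ≤ n) : 0 ≤ bDigitSum n := by
  by_cases hp : 0 < n
  · rw [ds_pos hp]
    have hm := PySem.Int.mod_nonneg n (b := 10) (by omega)
    have hd : 0 ≤ PySem.Int.floordiv n 10 := by
      rw [PySem.Int.floordiv_eq_ediv_of_pos (by omega)]
      omega
    have := ds_nonneg hd
    omega
  · have : n = 0 := by omega
    subst this
    rw [ds_zero]
termination_by n.toNat
decreasing_by
  rw [PySem.Int.floordiv_eq_ediv_of_pos (by omega)]
  omega

theorem ds_le (k : Nat) (i : Int) (h0 : 0 ≤ i) (h : i < 10 ^ k) :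
    bDigitSum i ≤ 9 * k := by
  induction k generalizing i with
  | zero =>
    have : i = 0 := by simpa using (by omega : i = 0)
    subst this
    simp [ds_zero]
  | succ k ih =>
    by_cases hp : 0 < i
    · rw [ds_pos hp, PySem.Int.mod_eq_emod_of_pos (by omega),
          PySem.Int.floordiv_eq_ediv_of_pos (by omega)]
      have hlt : i / 10 < 10 ^ k := by
        have : (10:Int) ^ (k+1) = 10 ^ k * 10 := by ring
        rw [this] at h
        omega
      have := ih (i / 10) (by omega) hlt
      have hm : i % 10 ≤ 9 := by omega
      push_cast
      push_cast at this
      omega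
    · have : i = 0 := by omega
      subst this
      simp [ds_zero]
      positivity

theorem roundtrip_small (n : Int) (h0 : 0 ≤ n) (h : n ≤ 90) :
    PySem.Int.ofStr? (PySem.Int.toStr n) = some n := by
  have h91 : ∀ m : Nat, m < 91 → PySem.Int.ofStr? (PySem.Int.toStr (m : Int)) = some (m : Int) := by
    decide
  have hn : n = ((n.toNat : Nat) : Int) := by omega
  rw [hn]
  exact h91 n.toNat (by omega)

-- a counting fold keyed through `key` is the counter of the mapped list
theorem foldl_key_counter {κ : Type} [BEq κ] (key : Int → κ) (l : List Int)
    (c : PySem.Dict κ Int) :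
    l.foldl (fun d i => d.insert (key i) (d.getD (key i) 0 + 1)) c
      = (l.map key).foldl (fun d s => d.insert s (d.getD s 0 + 1)) c := by
  induction l generalizing c with
  | nil => rfl
  | cons x l ih => simp only [List.map_cons, List.foldl_cons, ih]

-- effect of one digit-expansion block on a lookup
theorem block_getD (m : Nat) (s k : Int) (c : PySem.Dict Int Int) (v : Int) :
    ((PySem.List.pyRange 0 (m : Int)).foldl
        (fun c d => c.insert (s + d) (c.getD (s + d) 0 + k)) c).getD v 0
      = c.getD v 0 + (if s ≤ v ∧ v < s + m then k else 0) := by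
  induction m generalizing v with
  | zero =>
    rw [pyRange_nil (by omega)]
    simp only [List.foldl_nil]
    split_ifs with h
    · push_cast at h; omega
    · omega
  | succ m ih =>
    have hc : ((m + 1 : Nat) : Int) = (m : Int) + 1 := by push_cast; ring
    rw [hc, PySem.List.pyRange_one_succ_right (by positivity), List.foldl_append]
    simp only [List.foldl_cons, List.foldl_nil]
    rw [PySem.Dict.getD_insert]
    by_cases hv : v = s + (m : Int)
    · subst hv
      rw [if_pos rfl, ih (s + (m : Int))]
      split_ifs <;> push_cast at * <;> omega
    · rw [if_neg hv, ih v]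
      split_ifs <;> push_cast at * <;> omega
theorem expand_getD (l : List (Int × Int)) (c : PySem.Dict Int Int) (v : Int) :
    (l.foldl (fun c p =>
        (PySem.List.pyRange 0 10).foldl
          (fun c d => c.insert (p.1 + d) (c.getD (p.1 + d) 0 + p.2)) c) c).getD v 0
      = c.getD v 0 + (l.map (fun p => if p.1 ≤ v ∧ v < p.1 + 10 then p.2 else 0)).sum := by
  induction l generalizing c with
  | nil => simp
  | cons p l ih =>
    simp only [List.foldl_cons, List.map_cons, List.sum_cons]
    rw [ih]
    have h10 : ((PySem.List.pyRange 0 10).foldl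
        (fun c d => c.insert (p.1 + d) (c.getD (p.1 + d) 0 + p.2)) c).getD v 0
        = c.getD v 0 + (if p.1 ≤ v ∧ v < p.1 + 10 then p.2 else 0) := by
      have := block_getD 10 p.1 p.2 c v
      push_cast at this
      exact this
    rw [h10]
    ring

theorem expand_keys (l : List (Int × Int)) (c : PySem.Dict Int Int) (v : Int) :
    (v ∈ (l.foldl (fun c p =>
        (PySem.List.pyRange 0 10).foldl
          (fun c d => c.insert (p.1 + d) (c.getD (p.1 + d) 0 + p.2)) c) c).keys
      ↔ v ∈ c.keys ∨ ∃ p ∈ l, p.1 ≤ v ∧ v < p.1 + 10) := by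
  induction l generalizing c with
  | nil => simp
  | cons p l ih =>
    simp only [List.foldl_cons]
    rw [ih]
    rw [PySem.Dict.keys_foldl_insert_key (PySem.List.pyRange 0 10) (fun d => p.1 + d)
        (fun c d => c.getD (p.1 + d) 0 + p.2) c]
    rw [PySem.Set.mem_update]
    simp only [List.mem_map, PySem.List.mem_pyRange_one, List.mem_cons]
    constructor
    · rintro (h | ⟨q, hq, h1, h2⟩)
      · rcases h with hk | ⟨d, hd, rfl⟩
        · exact Or.inl hk
        · exact Or.inr ⟨p, Or.inl rfl, by omega, by omega⟩
      · exact Or.inr ⟨q, Or.inr hq, h1, h2⟩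
    · rintro (hk | ⟨q, hq | hq, h1, h2⟩)
      · exact Or.inl (Or.inl hk)
      · subst hq
        exact Or.inl (Or.inr ⟨v - q.1, ⟨by omega, by omega⟩, by omega⟩)
      · exact Or.inr ⟨q, hq, h1, h2⟩

theorem expand_nodup (l : List (Int × Int)) (c : PySem.Dict Int Int)
    (h : c.keys.Nodup) :
    (l.foldl (fun c p =>
        (PySem.List.pyRange 0 10).foldl
          (fun c d => c.insert (p.1 + d) (c.getD (p.1 + d) 0 + p.2)) c) c).keys.Nodup := by
  induction l generalizing c with
  | nil => simpa using h
  | cons p l ih =>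
    simp only [List.foldl_cons]
    exact ih _ (PySem.Dict.nodup_keys_foldl_insert_key _ _ _ _ h)

theorem count_block (m : Nat) (q v : Int) (hq : 0 ≤ q) (hm : m ≤ 10) :
    ((PySem.List.pyRange (10 * q) (10 * q + m)).map bDigitSum).count v
      = (if bDigitSum q ≤ v ∧ v < bDigitSum q + m then 1 else 0) := by
  revert hm
  induction m with
  | zero =>
    intro hm
    rw [show (10 * q + ((0 : Nat) : Int)) = 10 * q by push_cast; ring,
        pyRange_nil (le_refl _)]
    simp only [List.map_nil, List.count_nil]
    split_ifs with h
    · push_cast at h; omega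
    · rfl
  | succ m ih =>
    intro hm
    have hc : 10 * q + ((m + 1 : Nat) : Int) = (10 * q + (m : Int)) + 1 := by push_cast; ring
    rw [hc, PySem.List.pyRange_one_succ_right (by omega), List.map_append,
        List.count_append, ih (by omega)]
    have hds : bDigitSum (10 * q + (m : Int)) = bDigitSum q + (m : Int) :=
      ds_ten hq (by positivity) (by exact_mod_cast (by omega : ((m:Int)) < 10))
    simp only [List.map_cons, List.map_nil, hds, List.count_cons, List.count_nil]
    split_ifs
    all_goals first
      | omega
      | (simp only [beq_iff_eq] at *; omega)
theorem pyRange_ten (m : Nat) (a : Int) :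
    PySem.List.pyRange (10 * a) (10 * (a + m))
      = (PySem.List.pyRange a (a + m)).flatMap
          (fun q => PySem.List.pyRange (10 * q) (10 * q + 10)) := by
  induction m with
  | zero =>
    simp only [Nat.cast_zero, add_zero]
    rw [pyRange_nil (le_refl a), pyRange_nil (le_refl (10 * a))]
    rfl
  | succ m ih =>
    have h1 : a + ((m + 1 : Nat) : Int) = (a + (m : Int)) + 1 := by push_cast; ring
    rw [h1, show 10 * (a + (m : Int) + 1) = 10 * (a + (m : Int)) + 10 by ring,
        PySem.List.pyRange_one_succ_right (by omega), List.flatMap_append,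
        ← ih, PySem.List.pyRange_one_append (10 * a) (10 * (a + (m : Int)))
          (10 * (a + (m : Int)) + 10) (by omega) (by omega)]
    simp
theorem count_flatMap (l : List Int) (g : Int → List Int) (v : Int) :
    (l.flatMap g).count v = (l.map (fun q => (g q).count v)).sum := by
  induction l with
  | nil => simp
  | cons x l ih => simp [List.count_append, ih]

theorem single_hit (P : Int → Prop) [DecidablePred P] (x : Int) (ks : List Int)
    (hnd : ks.Nodup) (hx : x ∈ ks) :
    (ks.map (fun s => if P s ∧ s = x then (1 : Int) else 0)).sum
      = if P x then 1 else 0 := by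
  induction ks with
  | nil => simp at hx
  | cons k ks ih =>
    simp only [List.map_cons, List.sum_cons]
    by_cases hkx : k = x
    · subst hkx
      have hz : (ks.map (fun s => if P s ∧ s = k then (1 : Int) else 0)).sum = 0 := by
        apply List.sum_eq_zero
        intro y hy
        rcases List.mem_map.mp hy with ⟨s, hs, rfl⟩
        have hne : s ≠ k := fun h => (List.nodup_cons.mp hnd).1 (h ▸ hs)
        simp [hne]
      rw [hz]
      simp
    · have hx' : x ∈ ks := by
        rcases List.mem_cons.mp hx with h | h
        · exact absurd h.symm hkx
        · exact h
      rw [ih (List.nodup_cons.mp hnd).2 hx']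
      simp [hkx]

theorem weighted_count (ks l : List Int) (P : Int → Prop) [DecidablePred P]
    (hnd : ks.Nodup) (hsub : ∀ x ∈ l, x ∈ ks) :
    (ks.map (fun s => if P s then (l.count s : Int) else 0)).sum
      = ((l.countP (fun s => decide (P s)) : Nat) : Int) := by
  revert hsub
  induction l with
  | nil =>
    intro hsub
    simp
  | cons x l ih =>
    intro hsub
    have hx : x ∈ ks := hsub x List.mem_cons_self
    have step : (ks.map (fun s => if P s then ((x :: l).count s : Int) else 0))
        = ks.map (fun s => (if P s then (l.count s : Int) else 0)
            + (if P s ∧ s = x then 1 else 0)) := by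
      apply List.map_congr_left
      intro s _
      rw [List.count_cons]
      simp only [beq_iff_eq]
      split_ifs
      all_goals tauto
    rw [step, PySem.List.sum_map_add_int,
        ih (fun y hy => hsub y (List.mem_cons_of_mem _ hy)),
        single_hit P x ks hnd hx, List.countP_cons]
    by_cases hPx : P x
    · simp only [hPx, decide_true, if_true]
      push_cast
      ring
    · simp only [hPx, decide_false, if_false]
      push_cast
      ring

-- the main invariant of B's divide-and-conquer counter
theorem bCounts_spec (m : Nat) : ∀ lo hi : Int, (hi - lo).toNat ≤ m → 0 ≤ lo →
    (∀ v, (bRangeCounts lo hi).getD v 0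
        = (((PySem.List.pyRange lo hi).map bDigitSum).count v : Int))
    ∧ (bRangeCounts lo hi).keys.Nodup
    ∧ (∀ v, v ∈ (bRangeCounts lo hi).keys
        ↔ v ∈ (PySem.List.pyRange lo hi).map bDigitSum) := by
  induction m using Nat.strong_induction_on with
  | _ m IH =>
  intro lo hi hm h0
  rw [bRangeCounts]
  split_ifs with hlt
  · rw [foldl_key_counter, PySem.Dict.foldl_insert_getD_add_one_eq_counter]
    refine ⟨?_, ?_, ?_⟩
    · intro v
      rw [PySem.Dict.getD_counter]
    · rw [PySem.Dict.keys_counter]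
      exact PySem.Set.nodup_ofList _
    · intro v
      rw [PySem.Dict.keys_counter, PySem.Set.mem_ofList]
  · dsimp only
    rw [PySem.Int.floordiv_eq_ediv_of_pos (a := -lo) (by omega),
        PySem.Int.floordiv_eq_ediv_of_pos (a := hi) (by omega),
        PySem.Int.floordiv_eq_ediv_of_pos (a := -(-lo / 10) * 10) (by omega),
        PySem.Int.floordiv_eq_ediv_of_pos (a := hi / 10 * 10) (by omega),
        Int.mul_ediv_cancel _ (by norm_num : (10:Int) ≠ 0),
        Int.mul_ediv_cancel _ (by norm_num : (10:Int) ≠ 0)]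
    set A : Int := -(-lo / 10) with hA
    set B : Int := hi / 10 with hB
    obtain ⟨ihG, ihN, ihK⟩ := IH (B - A).toNat (by omega) A B le_rfl (by omega)
    have hsplit : PySem.List.pyRange lo hi
        = PySem.List.pyRange lo (A * 10) ++ (PySem.List.pyRange (A * 10) (B * 10)
            ++ PySem.List.pyRange (B * 10) hi) := by
      rw [PySem.List.pyRange_one_append lo (A * 10) hi (by omega) (by omega),
          PySem.List.pyRange_one_append (A * 10) (B * 10) hi (by omega) (by omega)]
    have hmid : PySem.List.pyRange (A * 10) (B * 10)
        = (PySem.List.pyRange A B).flatMap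
            (fun q => PySem.List.pyRange (10 * q) (10 * q + 10)) := by
      have h := pyRange_ten (B - A).toNat A
      rw [show A + ((B - A).toNat : Int) = B by omega] at h
      rw [show A * 10 = 10 * A by ring, show B * 10 = 10 * B by ring]
      exact h
    have hc1keys : ((PySem.List.pyRange lo (A * 10)).foldl
        (fun c i => c.insert (bDigitSum i) (c.getD (bDigitSum i) 0 + 1))
        (PySem.Dict.empty : PySem.Dict Int Int)).keys
        = PySem.Set.ofList ((PySem.List.pyRange lo (A * 10)).map bDigitSum) := by
      rw [foldl_key_counter, PySem.Dict.foldl_insert_getD_add_one_eq_counter,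
          PySem.Dict.keys_counter]
    have hndc2 : (((PySem.List.pyRange (B * 10) hi)).foldl
        (fun c i => c.insert (bDigitSum i) (c.getD (bDigitSum i) 0 + 1))
        ((PySem.List.pyRange lo (A * 10)).foldl
          (fun c i => c.insert (bDigitSum i) (c.getD (bDigitSum i) 0 + 1))
          (PySem.Dict.empty : PySem.Dict Int Int))).keys.Nodup := by
      apply PySem.Dict.nodup_keys_foldl_insert_key
      rw [hc1keys]
      exact PySem.Set.nodup_ofList _
    -- per-v counting facts
    have hmidcount : ∀ v, ((PySem.List.pyRange (A * 10) (B * 10)).map bDigitSum).count v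
        = ((PySem.List.pyRange A B).map bDigitSum).countP
            (fun s => decide (s ≤ v ∧ v < s + 10)) := by
      intro v
      rw [hmid, List.map_flatMap, count_flatMap]
      have hcongr : (PySem.List.pyRange A B).map
            (fun q => ((PySem.List.pyRange (10 * q) (10 * q + 10)).map bDigitSum).count v)
          = (PySem.List.pyRange A B).map
            (fun q => if bDigitSum q ≤ v ∧ v < bDigitSum q + 10 then 1 else 0) := by
        apply List.map_congr_left
        intro q hq
        have hq' := PySem.List.mem_pyRange_one.mp hq
        have := count_block 10 q v (by omega) (by omega)
        push_cast at this
        exact this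
      rw [hcongr, List.countP_map]
      induction (PySem.List.pyRange A B) with
      | nil => simp
      | cons x xs ih => simp [List.countP_cons, ih, Function.comp]; split_ifs <;> omega
    refine ⟨?_, ?_, ?_⟩
    · intro v
      rw [expand_getD, PySem.Dict.items_eq_map_keys _ ihN 0, List.map_map,
          foldl_key_counter (c := PySem.Dict.empty),
          PySem.Dict.foldl_insert_getD_add_one_eq_counter]
      rw [foldl_key_counter (l := PySem.List.pyRange (B * 10) hi),
          PySem.Dict.getD_foldl_insert_add_one, PySem.Dict.getD_counter]
      have hcomp : ((bRangeCounts A B).keys.map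
            ((fun p : Int × Int => if p.1 ≤ v ∧ v < p.1 + 10 then p.2 else 0)
              ∘ (fun k => (k, (bRangeCounts A B).getD k 0)))).sum
          = ((bRangeCounts A B).keys.map (fun s =>
              if s ≤ v ∧ v < s + 10
              then ((((PySem.List.pyRange A B).map bDigitSum).count s : Int)) else 0)).sum := by
        congr 1
        apply List.map_congr_left
        intro s hs
        simp only [Function.comp]
        rw [ihG s]
      rw [hcomp, weighted_count _ _ _ ihN (fun x hx => (ihK x).mpr hx)]
      rw [hsplit, List.map_append, List.map_append, List.count_append, List.count_append,
          hmidcount v]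
      push_cast
      ring
    · exact expand_nodup _ _ hndc2
    · intro v
      rw [expand_keys,
          PySem.Dict.keys_foldl_insert_key (PySem.List.pyRange (B * 10) hi) bDigitSum
            (fun d x => d.getD (bDigitSum x) 0 + 1) _,
          PySem.Set.mem_update, hc1keys, PySem.Set.mem_ofList]
      have hitems : (∃ p ∈ (bRangeCounts A B).items, p.1 ≤ v ∧ v < p.1 + 10)
          ↔ ∃ s ∈ (PySem.List.pyRange A B).map bDigitSum, s ≤ v ∧ v < s + 10 := by
        rw [PySem.Dict.items_eq_map_keys _ ihN 0]
        constructor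
        · rintro ⟨p, hp, h1, h2⟩
          rcases List.mem_map.mp hp with ⟨s, hs, rfl⟩
          exact ⟨s, (ihK s).mp hs, h1, h2⟩
        · rintro ⟨s, hs, h1, h2⟩
          exact ⟨(s, (bRangeCounts A B).getD s 0),
            List.mem_map.mpr ⟨s, (ihK s).mpr hs, rfl⟩, h1, h2⟩
      have hmidmem : (∃ s ∈ (PySem.List.pyRange A B).map bDigitSum, s ≤ v ∧ v < s + 10)
          ↔ v ∈ (PySem.List.pyRange (A * 10) (B * 10)).map bDigitSum := by
        constructor
        · rintro ⟨s, hs, h1, h2⟩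
          rcases List.mem_map.mp hs with ⟨q, hq, rfl⟩
          have hq' := PySem.List.mem_pyRange_one.mp hq
          refine List.mem_map.mpr ⟨10 * q + (v - bDigitSum q),
            PySem.List.mem_pyRange_one.mpr ⟨by omega, by omega⟩, ?_⟩
          rw [ds_ten (by omega) (by omega) (by omega)]
          omega
        · intro hv
          rcases List.mem_map.mp hv with ⟨x, hx, rfl⟩
          have hx' := PySem.List.mem_pyRange_one.mp hx
          have hds : bDigitSum x = bDigitSum (x / 10) + x % 10 := by
            have h := ds_ten (q := x / 10) (d := x % 10) (by omega) (by omega) (by omega)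
            rw [show 10 * (x / 10) + x % 10 = x by omega] at h
            omega
          refine ⟨bDigitSum (x / 10), List.mem_map.mpr ⟨x / 10,
            PySem.List.mem_pyRange_one.mpr ⟨by omega, by omega⟩, rfl⟩, by omega, by omega⟩
      rw [hitems, hmidmem, hsplit, List.map_append, List.map_append, List.mem_append,
          List.mem_append]
      tauto

theorem toStr_inj_small {x y : Int} (hx0 : 0 ≤ x) (hx : x ≤ 90) (hy0 : 0 ≤ y) (hy : y ≤ 90)
    (h : PySem.Int.toStr x = PySem.Int.toStr y) : x = y := by
  have h1 := roundtrip_small x hx0 hx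
  have h2 := roundtrip_small y hy0 hy
  rw [h] at h1
  exact Option.some.inj (h1.symm.trans h2)

theorem count_map_inj (l : List Int) (s : Int) (f : Int → String)
    (hinj : ∀ x ∈ l, f x = f s → x = s) : (l.map f).count (f s) = l.count s := by
  induction l with
  | nil => simp
  | cons x l ih =>
    have ihh := ih (fun y hy h => hinj y (List.mem_cons_of_mem _ hy) h)
    by_cases hfx : f s = f x
    · have hx : x = s := hinj x List.mem_cons_self hfx.symm
      subst hx
      simp [ihh]
    · have hfx' : ¬ f x = f s := fun h => hfx h.symm
      have hsx' : ¬ x = s := fun h => hfx (by rw [h])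
      simp [ihh, hfx', hsx']

-- ===== VERDICT (by name: the statement is the Claim_ definition above) =====
theorem start_to_end_spec : Claim_equal_start_to_end := by
  unfold Claim_equal_start_to_end
  intro n nf hdom hpre
  unfold Spec_start_to_end
  unfold Dom_start_to_end at hdom
  simp only [pvDomInt, Bool.and_eq_true, decide_eq_true_eq] at hdom
  unfold Pre_start_to_end at hpre
  by_cases hn : n ≤ 0
  · unfold start_to_end start_to_end_alt
    dsimp only
    rw [pyRange_nil (by omega), bRangeCounts, if_pos (by omega : nf + n - nf < 10),
        pyRange_nil (by omega)]
    rfl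
  · have hlo : 0 ≤ nf := by
      rcases hpre with h | h
      · omega
      · exact h
    obtain ⟨G, N, K⟩ := bCounts_spec ((nf + n - nf).toNat) nf (nf + n) le_rfl hlo
    unfold start_to_end start_to_end_alt
    dsimp only
    simp only [show ∀ i, aDigitLoop 0 i = bDigitSum i from fun i => aLoop_eq_bLoop i 0]
    rw [foldl_key_counter (key := fun i => PySem.Int.toStr (bDigitSum i)),
        PySem.Dict.foldl_insert_getD_add_one_eq_counter]
    set sums : List Int := (PySem.List.pyRange nf (nf + n)).map bDigitSum with hsums
    have hmaps : (PySem.List.pyRange nf (nf + n)).map (fun i => PySem.Int.toStr (bDigitSum i))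
        = sums.map PySem.Int.toStr := by
      rw [hsums, List.map_map]
      rfl
    rw [hmaps]
    have hbound : ∀ s ∈ sums, 0 ≤ s ∧ s ≤ 90 := by
      intro s hs
      rcases List.mem_map.mp hs with ⟨i, hi, rfl⟩
      have hi' := PySem.List.mem_pyRange_one.mp hi
      have h0i : 0 ≤ i := by omega
      refine ⟨ds_nonneg h0i, ?_⟩
      have hilt : i < 10 ^ 10 := by
        have : (10:Int) ^ 10 = 10000000000 := by norm_num
        omega
      have h := ds_le 10 i h0i hilt
      push_cast at h
      omega
    set S : List Int := PySem.List.sorted (PySem.Set.ofList sums) (fun s => s) with hS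
    have hSsums : ∀ s ∈ S, s ∈ sums := by
      intro s hs
      rw [hS, PySem.List.mem_sorted, PySem.Set.mem_ofList] at hs
      exact hs
    have hA : PySem.List.sorted (PySem.Dict.counter (sums.map PySem.Int.toStr)).items
          (fun x => (PySem.Int.ofStr? x.1).getD 0)
        = S.map (fun s => (PySem.Int.toStr s, (sums.count s : Int))) := by
      apply PySem.List.sorted_eq_of_perm_of_pairwise_lt
      · -- permutation with the counter's items
        rw [PySem.Dict.items_counter]
        have hperm1 : S.Perm (PySem.Set.ofList sums) := by
          rw [hS]
          exact PySem.List.sorted_perm _ _ _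
        have hnd2 : ((PySem.Set.ofList sums).map PySem.Int.toStr).Nodup := by
          refine List.Nodup.map_on ?_ (PySem.Set.nodup_ofList _)
          intro x hx y hy hxy
          have hbx := hbound x ((PySem.Set.mem_ofList _ _).mp hx)
          have hby := hbound y ((PySem.Set.mem_ofList _ _).mp hy)
          exact toStr_inj_small hbx.1 hbx.2 hby.1 hby.2 hxy
        have hperm2 : ((PySem.Set.ofList sums).map PySem.Int.toStr).Perm
            (PySem.Set.ofList (sums.map PySem.Int.toStr)) := by
          rw [List.perm_ext_iff_of_nodup hnd2 (PySem.Set.nodup_ofList _)]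
          intro k
          rw [PySem.Set.mem_ofList]
          constructor
          · intro hk
            rcases List.mem_map.mp hk with ⟨s, hs, rfl⟩
            exact List.mem_map.mpr ⟨s, (PySem.Set.mem_ofList _ _).mp hs, rfl⟩
          · intro hk
            rcases List.mem_map.mp hk with ⟨s, hs, rfl⟩
            exact List.mem_map.mpr ⟨s, (PySem.Set.mem_ofList _ _).mpr hs, rfl⟩
        have hmapeq : (PySem.Set.ofList sums).map
              (fun s => (PySem.Int.toStr s, ((sums.map PySem.Int.toStr).count (PySem.Int.toStr s) : Int)))
            = (PySem.Set.ofList sums).map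
              (fun s => (PySem.Int.toStr s, (sums.count s : Int))) := by
          apply List.map_congr_left
          intro s hs
          have hbs := hbound s ((PySem.Set.mem_ofList _ _).mp hs)
          have hc : (sums.map PySem.Int.toStr).count (PySem.Int.toStr s) = sums.count s := by
            apply count_map_inj
            intro x hx hxy
            have hbx := hbound x hx
            exact toStr_inj_small hbx.1 hbx.2 hbs.1 hbs.2 hxy
          rw [hc]
        refine (hperm1.map _).trans ?_
        rw [← hmapeq,
            show (fun s => (PySem.Int.toStr s,
                ((sums.map PySem.Int.toStr).count (PySem.Int.toStr s) : Int)))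
              = ((fun k => (k, ((sums.map PySem.Int.toStr).count k : Int)))
                  ∘ PySem.Int.toStr) from rfl,
            ← List.map_map]
        exact hperm2.map _
      · -- pairwise strictly increasing keys
        rw [List.pairwise_map]
        have hp : List.Pairwise (· < ·) S := by
          rw [hS]
          exact PySem.List.sorted_ofList_pairwise_lt _
        refine List.Pairwise.imp_of_mem ?_ hp
        intro a b ha hb hab
        have hba := hbound a (hSsums a ha)
        have hbb := hbound b (hSsums b hb)
        simpa [roundtrip_small a hba.1 hba.2, roundtrip_small b hbb.1 hbb.2] using hab
    rw [hA]
    have hBkeys : PySem.List.sorted (bRangeCounts nf (nf + n)).keys (fun s => s) = S := by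
      rw [hS]
      apply PySem.List.sorted_eq_sorted_of_perm _ _ _ (fun a b h => h)
      rw [List.perm_ext_iff_of_nodup N (PySem.Set.nodup_ofList _)]
      intro a
      rw [K a, PySem.Set.mem_ofList]
    rw [hBkeys]
    apply List.map_congr_left
    intro s hs
    rw [G s]
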